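-- pv_equiv track=rewrite | github.com/Manmapi/leetcode | 3399-smallest-substring-with-identical-characters-ii/3399-smallest-substring-with-identical-characters-ii.py | mostOptimizedCost
-- ===== SOURCE A (Python) =====
-- def mostOptimizedCost(s):
--     n = len(s)
--     cost1, cost2 = 0, 0
--     x = 0
--     for i in range(n):
--         if str(x) != s[i]:
--             cost1 += 1
--         else:
--             cost2 += 1
--         x ^= 1
--     return min(cost1, cost2)
-- ===== SOURCE B (Python) =====
-- def mostOptimizedCost(s):
--     matches = s[::2].count('0') + s[1::2].count('1')
--     return min(matches, len(s) - matches)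
-- ===== Notes on version B (the rewrite author's own statement) =====
-- stated objective: faster
-- what changed: B replaces A's single interpreted per-character loop (toggling a state bit x and maintaining two counters with str(x) comparisons) by two parity-sliced counting passes, s[::2].count('0') + s[1::2].count('1'), deriving the mismatch count by complement arithmetic len(s) - matches; slicing and str.count run at C speed, which a timing run measured as a large constant-factor win.
import Mathlib
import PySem

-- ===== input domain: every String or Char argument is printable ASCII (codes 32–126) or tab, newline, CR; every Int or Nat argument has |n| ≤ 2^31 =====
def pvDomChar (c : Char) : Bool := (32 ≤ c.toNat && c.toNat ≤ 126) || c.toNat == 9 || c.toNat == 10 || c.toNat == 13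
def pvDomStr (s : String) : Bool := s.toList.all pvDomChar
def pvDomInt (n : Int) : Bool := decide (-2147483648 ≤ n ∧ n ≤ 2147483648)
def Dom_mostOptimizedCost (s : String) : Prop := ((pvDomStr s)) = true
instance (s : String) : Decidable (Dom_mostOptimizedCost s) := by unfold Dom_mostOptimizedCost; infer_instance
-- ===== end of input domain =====

-- B counts matches against the alternating pattern by two parity-sliced counting passes
-- and gets the mismatch count by complement arithmetic, instead of A's single per-character
-- loop toggling a state bit with two counters; a timing run measured B faster (constant factor).

-- ===== PORT A =====
-- the for-loop of A: state (cost1, cost2, x), one step per character of s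
def pvLoopA : List Char → Int → Int → Int → Int × Int
  | [], c1, c2, _ => (c1, c2)
  | c :: rest, c1, c2, x =>
    if PySem.Int.toChars x ≠ [c] then pvLoopA rest (c1 + 1) c2 (PySem.Int.bxor x 1)
    else pvLoopA rest c1 (c2 + 1) (PySem.Int.bxor x 1)

def mostOptimizedCost (s : String) : Int :=
  let r := pvLoopA s.toList 0 0 0
  min r.1 r.2

-- ===== PORT B =====
def mostOptimizedCost_alt (s : String) : Int :=
  let matches_ : Int :=
    ((PySem.Str.count ((PySem.Str.slice? s none none 2).getD "") "0"
      + PySem.Str.count ((PySem.Str.slice? s (some 1) none 2).getD "") "1" : Nat) : Int)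
  min matches_ (PySem.Str.len s - matches_)

-- ===== PRECONDITION & SPEC =====
def Spec_mostOptimizedCost (s : String) (out : Int) : Prop := out = mostOptimizedCost_alt s
instance (s : String) (out : Int) : Decidable (Spec_mostOptimizedCost s out) := by unfold Spec_mostOptimizedCost; infer_instance

-- ===== CLAIM (what is proved, stated in full; the proofs are below) =====
def Claim_equal_mostOptimizedCost : Prop := ∀ (s : String), Dom_mostOptimizedCost s → Spec_mostOptimizedCost s (mostOptimizedCost s)

-- ===== LEMMAS AND PROOFS =====
-- number of positions of l matching the alternating pattern, the position of the head being j
def pvCnt : List Char → Nat → Int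
  | [], _ => 0
  | c :: rest, j => (if c = (if j % 2 = 0 then '0' else '1') then 1 else 0) + pvCnt rest (j + 1)

-- elements of l at even positions (what l[::2] selects)
def pvEvens : List Char → List Char
  | [] => []
  | [a] => [a]
  | a :: _ :: r => a :: pvEvens r

lemma pv_bxor_step (j : Nat) :
    PySem.Int.bxor ((j % 2 : Nat) : Int) 1 = (((j + 1) % 2 : Nat) : Int) := by
  rcases Nat.even_or_odd j with h | h
  · rw [Nat.even_iff.mp h, Nat.succ_mod_two_eq_one_iff.mpr (Nat.even_iff.mp h)]; decide
  · rw [Nat.odd_iff.mp h, Nat.succ_mod_two_eq_zero_iff.mpr (Nat.odd_iff.mp h)]; decide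

lemma pvLoopA_eq (l : List Char) (j : Nat) (c1 c2 : Int) :
    pvLoopA l c1 c2 ((j % 2 : Nat) : Int) =
      (c1 + ((l.length : Int) - pvCnt l j), c2 + pvCnt l j) := by
  induction l generalizing j c1 c2 with
  | nil => simp [pvLoopA, pvCnt]
  | cons c rest ih =>
    simp only [pvLoopA, pvCnt, pv_bxor_step j, ih (j + 1)]
    rcases Nat.even_or_odd j with h | h
    · have h0 : j % 2 = 0 := Nat.even_iff.mp h
      rw [h0]
      have ht : PySem.Int.toChars ((0 : Nat) : Int) = ['0'] := by decide
      rw [ht]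
      by_cases hc : c = '0'
      · rw [if_neg (by simp [hc])]
        simp [Prod.ext_iff, hc]; omega
      · rw [if_pos (by simp; exact fun he => hc he.symm)]
        simp [Prod.ext_iff, hc]; omega
    · have h1 : j % 2 = 1 := Nat.odd_iff.mp h
      rw [h1]
      have ht : PySem.Int.toChars ((1 : Nat) : Int) = ['1'] := by decide
      rw [ht]
      by_cases hc : c = '1'
      · rw [if_neg (by simp [hc])]
        simp [Prod.ext_iff, hc]; omega
      · rw [if_pos (by simp; exact fun he => hc he.symm)]
        simp [Prod.ext_iff, hc]; omega

lemma pvEvens_cons (a : Char) (l : List Char) : pvEvens (a :: l) = a :: pvEvens l.tail := by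
  cases l <;> simp [pvEvens]

lemma pvEvens_getElem? (l : List Char) (k : Nat) : (pvEvens l)[k]? = l[2 * k]? := by
  induction l using pvEvens.induct generalizing k with
  | case1 => simp [pvEvens]
  | case2 a =>
    cases k with
    | zero => simp [pvEvens]
    | succ k => simp [pvEvens]
  | case3 a b r ih =>
    cases k with
    | zero => simp [pvEvens]
    | succ k =>
      simp only [pvEvens, List.getElem?_cons_succ, ih]
      have : 2 * (k + 1) = (2 * k + 1) + 1 := by omega
      rw [this, List.getElem?_cons_succ, List.getElem?_cons_succ]

lemma pvEvens_length (l : List Char) : (pvEvens l).length = (l.length + 1) / 2 := by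
  induction l using pvEvens.induct with
  | case1 => simp [pvEvens]
  | case2 a => simp [pvEvens]
  | case3 a b r ih => simp [pvEvens, ih]; omega

lemma pv_fm_range {α : Type} (l : List α) (f : Nat → Option α) (h : ∀ k, f k = l[k]?) (m : Nat) :
    List.filterMap f (List.range m) = l.take m := by
  induction m with
  | zero => simp
  | succ m ih =>
    rw [List.range_succ, List.filterMap_append, ih, List.take_add_one]
    cases hl : l[m]? <;> simp [h, hl]

lemma pv_slice2_even (l : List Char) :
    PySem.List.slice? l none none 2 = some (pvEvens l) := by
  simp only [PySem.List.slice?, PySem.List.sliceIndices]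
  norm_num
  have hcount : (if 0 < l.length then (((l.length : Int) + 2 - 1) / 2).toNat else 0)
      = (l.length + 1) / 2 := by split_ifs <;> omega
  rw [hcount,
    pv_fm_range (pvEvens l) _ (fun k => by
      have h2 : ((2 : Int) * (k : Int)).toNat = 2 * k := by omega
      rw [h2, pvEvens_getElem?]),
    ← pvEvens_length, List.take_length]

lemma pv_slice2_odd (l : List Char) :
    PySem.List.slice? l (some 1) none 2 = some (pvEvens l.tail) := by
  cases l with
  | nil => decide
  | cons a r =>
    simp only [PySem.List.slice?, PySem.List.sliceIndices]
    norm_num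
    have hcount : (if 0 < r.length then (((r.length : Int) + 2 - 1) / 2).toNat else 0)
        = (r.length + 1) / 2 := by split_ifs <;> omega
    rw [hcount,
      pv_fm_range (pvEvens r) _ (fun k => by
        have h2 : ((1 : Int) + 2 * (k : Int)).toNat = 2 * k + 1 := by omega
        rw [h2, List.getElem?_cons_succ, pvEvens_getElem?]),
      ← pvEvens_length, List.take_length]

lemma pv_go_single (c : Char) (l : List Char) (fuel acc : Nat) (h : l.length ≤ fuel) :
    PySem.Chars.count.go [c] fuel l acc = acc + l.count c := by
  induction l generalizing fuel acc with
  | nil => cases fuel <;> simp [PySem.Chars.count.go]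
  | cons a r ih =>
    cases fuel with
    | zero => simp at h
    | succ fuel =>
      rw [PySem.Chars.count.go]
      simp only [List.isPrefixOf_cons₂, List.isPrefixOf_nil_left, Bool.and_true, List.length_cons,
        List.drop_succ_cons, List.length_nil, List.drop_zero]
      by_cases hc : a = c
      · rw [if_pos (by simp [hc]), ih fuel (acc + 1) (by simpa using h)]
        subst hc
        simp
        omega
      · rw [if_neg (by simp; exact fun h' => hc h'.symm), ih fuel acc (by simpa using h)]
        rw [List.count_cons_of_ne hc]
      
lemma pv_count_single (l : List Char) (c : Char) :
    PySem.Chars.count l [c] = l.count c := by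
  simp [PySem.Chars.count, pv_go_single c l l.length 0 le_rfl]

lemma pvCnt_add_two (l : List Char) (j : Nat) : pvCnt l (j + 2) = pvCnt l j := by
  induction l generalizing j with
  | nil => simp [pvCnt]
  | cons a r ih =>
    simp only [pvCnt, Nat.add_mod_right]
    rw [show j + 2 + 1 = (j + 1) + 2 by omega, ih]

lemma pv_counts (l : List Char) :
    (((pvEvens l).count '0' + (pvEvens l.tail).count '1' : Nat) : Int) = pvCnt l 0 := by
  induction l using pvEvens.induct with
  | case1 => simp [pvEvens, pvCnt]
  | case2 a =>
    simp only [pvEvens, List.tail_cons, pvCnt]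
    by_cases hc : a = '0' <;> simp [hc]
  | case3 a b r ih =>
    simp only [pvEvens, List.tail_cons, pvEvens_cons, pvCnt, List.count_cons]
    rw [show (0:Nat) + 1 + 1 = 0 + 2 by rfl, pvCnt_add_two, ← ih]
    by_cases h0 : a = '0' <;> by_cases h1 : b = '1' <;> simp [h0, h1] <;> ring

-- ===== VERDICT (by name: the statement is the Claim_ definition above) =====
theorem mostOptimizedCost_spec : Claim_equal_mostOptimizedCost := by
  intro s _
  have hl : pvLoopA s.toList 0 0 0 =
      ((s.toList.length : Int) - pvCnt s.toList 0, pvCnt s.toList 0) := by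
    simpa using pvLoopA_eq s.toList 0 0 0
  simp only [Spec_mostOptimizedCost, mostOptimizedCost, mostOptimizedCost_alt, hl,
    PySem.Str.slice?, PySem.Chars.slice?_eq_listSlice?, pv_slice2_even, pv_slice2_odd,
    Option.map_some, Option.getD_some, PySem.Str.count_eq, PySem.Str.len]
  rw [show ("0" : String).toList = ['0'] from rfl, show ("1" : String).toList = ['1'] from rfl]
  simp only [String.toList_ofList, pv_count_single, pv_counts]
  exact min_comm _ _
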